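-- pv_equiv track=rewrite | github.com/lainsce/vimana | extras/Pad/convert_font.py | byte_to_2bpp
-- ===== SOURCE A (Python) =====
-- def byte_to_2bpp(p0, p1):
--     """Convert plane0 byte and plane1 byte to 2bpp uint16."""
--     result = 0
--     for bit in range(8):
--         b0 = (p0 >> (7 - bit)) & 1
--         b1 = (p1 >> (7 - bit)) & 1
--         color = b1 * 2 + b0
--         result |= (color << ((7 - bit) * 2))
--     return result
-- ===== SOURCE B (Python) =====
-- def byte_to_2bpp(p0, p1):
--     """Convert plane0 byte and plane1 byte to 2bpp uint16."""
--     def spread(x):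
--         x &= 0xFF
--         x = (x | (x << 4)) & 0x0F0F
--         x = (x | (x << 2)) & 0x3333
--         x = (x | (x << 1)) & 0x5555
--         return x
--     return spread(p0) | (spread(p1) << 1)
-- ===== Notes on version B (the rewrite author's own statement) =====
-- stated objective: alternative
-- what changed: Replaced the 8-iteration per-bit loop by branch-free Morton bit-spreading: each plane byte is scattered into even bit positions with three mask-and-shift steps and the two spreads are OR-combined, no loop over bits.
import Mathlib
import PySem

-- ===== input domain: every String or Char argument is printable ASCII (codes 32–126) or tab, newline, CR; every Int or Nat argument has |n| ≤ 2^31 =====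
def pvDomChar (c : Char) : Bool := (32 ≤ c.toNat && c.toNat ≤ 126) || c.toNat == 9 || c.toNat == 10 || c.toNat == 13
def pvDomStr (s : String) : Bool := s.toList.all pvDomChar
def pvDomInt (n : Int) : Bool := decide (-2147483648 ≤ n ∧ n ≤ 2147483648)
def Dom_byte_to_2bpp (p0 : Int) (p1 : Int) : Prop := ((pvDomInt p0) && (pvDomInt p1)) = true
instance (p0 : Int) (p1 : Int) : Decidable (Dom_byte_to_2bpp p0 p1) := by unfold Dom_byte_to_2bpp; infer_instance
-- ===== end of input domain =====

-- B replaces A's 8-iteration per-bit loop by branch-free Morton bit-spreading (three mask-and-shift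
-- steps per plane, OR-combined); objective: alternative algorithm, same exact result.


-- ===== PORT A =====
-- Python's `x >> k` / `x << k` for k ≥ 0 are Lean's `>>> (k:Nat)` / `<<< (k:Nat)`; here the shift
-- count 7-bit is always in 0..7 inside the loop, so `.toNat` is exact.
def byte_to_2bpp (p0 : Int) (p1 : Int) : Int :=
  (PySem.List.pyRange 0 8 1).foldl (fun result bit =>
    let b0 := PySem.Int.band (p0 >>> (7 - bit).toNat) 1
    let b1 := PySem.Int.band (p1 >>> (7 - bit).toNat) 1
    let color := b1 * 2 + b0
    PySem.Int.bor result (color <<< ((7 - bit).toNat * 2))) 0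

-- ===== PORT B =====
def pvSpread (x : Int) : Int :=
  let x1 := PySem.Int.band x 255
  let x2 := PySem.Int.band (PySem.Int.bor x1 (x1 <<< 4)) 3855
  let x3 := PySem.Int.band (PySem.Int.bor x2 (x2 <<< 2)) 13107
  PySem.Int.band (PySem.Int.bor x3 (x3 <<< 1)) 21845

def byte_to_2bpp_alt (p0 : Int) (p1 : Int) : Int :=
  PySem.Int.bor (pvSpread p0) (pvSpread p1 <<< 1)

-- ===== PRECONDITION & SPEC =====
def Spec_byte_to_2bpp (p0 : Int) (p1 : Int) (out : Int) : Prop := out = byte_to_2bpp_alt p0 p1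
instance (p0 : Int) (p1 : Int) (out : Int) : Decidable (Spec_byte_to_2bpp p0 p1 out) := by unfold Spec_byte_to_2bpp; infer_instance

-- ===== CLAIM (what is proved, stated in full; the proofs are below) =====
def Claim_equal_byte_to_2bpp : Prop := ∀ (p0 : Int) (p1 : Int), Dom_byte_to_2bpp p0 p1 → Spec_byte_to_2bpp p0 p1 (byte_to_2bpp p0 p1)

-- ===== LEMMAS AND PROOFS =====

-- bitwise AND with 255 is mod 256 (Python semantics, also on negatives)
theorem pv_band255 (p : Int) : PySem.Int.band p 255 = p % 256 := by
  have hand : ∀ n : ℕ, n &&& 255 = n % 256 := fun n => by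
    simpa using Nat.and_two_pow_sub_one_eq_mod n 8
  rw [PySem.Int.band.eq_1]
  by_cases h1 : 0 ≤ p
  · simp only [h1, if_true, show (0:Int) ≤ 255 by norm_num,
      show ((255:Int).toNat) = 255 from rfl, hand]
    omega
  · simp only [h1, if_false, show (0:Int) ≤ 255 by norm_num, if_true,
      show ((255:Int).toNat) = 255 from rfl, Nat.and_comm 255, hand]
    omega

-- the bit (p >> k) & 1 as floor-div arithmetic
theorem pv_bit_arith (p k : Int) (hk : 0 ≤ k) :
    PySem.Int.band (p >>> k) 1 = p / 2^k.toNat % 2 := by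
  obtain ⟨n, rfl⟩ := Int.eq_ofNat_of_zero_le hk
  rw [Int.shiftRight_natCast_right, PySem.Int.band_one, Int.shiftRight_eq_div_pow]
  simp [PySem.Int.mod, Int.fmod_eq_emod]

-- Nat: OR-ing a low part below 2^s into a multiple of 2^s is addition
theorem pv_or_term (M t s : ℕ) (ht : t < 2^s) : (M * 2^s) ||| t = M * 2^s + t := by
  rw [← Nat.shiftLeft_eq, ← Nat.shiftLeft_add_eq_or_of_lt ht]

theorem pv_nat_key (c0 c1 c2 c3 c4 c5 c6 c7 : ℕ)
    (h0 : c0 ≤ 3) (h1 : c1 ≤ 3) (h2 : c2 ≤ 3) (h3 : c3 ≤ 3)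
    (h4 : c4 ≤ 3) (h5 : c5 ≤ 3) (h6 : c6 ≤ 3) :
    c7*16384 ||| c6*4096 ||| c5*1024 ||| c4*256 ||| c3*64 ||| c2*16 ||| c1*4 ||| c0
      = c0 + c1*4 + c2*16 + c3*64 + c4*256 + c5*1024 + c6*4096 + c7*16384 := by
  rw [show c7*16384 = c7*2^14 from by ring, pv_or_term c7 _ 14 (by omega)]
  rw [show c7*2^14 + c6*4096 = (c7*4+c6)*2^12 from by ring, pv_or_term _ _ 12 (by omega)]
  rw [show (c7*4+c6)*2^12 + c5*1024 = (c7*16+c6*4+c5)*2^10 from by ring, pv_or_term _ _ 10 (by omega)]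
  rw [show (c7*16+c6*4+c5)*2^10 + c4*256 = (c7*64+c6*16+c5*4+c4)*2^8 from by ring, pv_or_term _ _ 8 (by omega)]
  rw [show (c7*64+c6*16+c5*4+c4)*2^8 + c3*64 = (c7*256+c6*64+c5*16+c4*4+c3)*2^6 from by ring, pv_or_term _ _ 6 (by omega)]
  rw [show (c7*256+c6*64+c5*16+c4*4+c3)*2^6 + c2*16 = (c7*1024+c6*256+c5*64+c4*16+c3*4+c2)*2^4 from by ring, pv_or_term _ _ 4 (by omega)]
  rw [show (c7*1024+c6*256+c5*64+c4*16+c3*4+c2)*2^4 + c1*4 = (c7*4096+c6*1024+c5*256+c4*64+c3*16+c2*4+c1)*2^2 from by ring, pv_or_term _ _ 2 (by omega)]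
  omega

-- Nat: base-4-digit sums are below 4^n
theorem pv_sum_lt (n : ℕ) (f : ℕ → ℕ) (hf : ∀ k, f k ≤ 3) :
    (∑ k ∈ Finset.range n, f k * 4^k) < 4^n := by
  induction n with
  | zero => simp
  | succ n ih =>
    rw [Finset.sum_range_succ]
    have h1 : f n * 4^n ≤ 3 * 4^n := Nat.mul_le_mul_right _ (hf n)
    have h2 : (4:ℕ)^(n+1) = 4 * 4^n := by ring
    omega

-- Nat: splitting an OR at a 2^s boundary
theorem pv_or_split (a b x y : ℕ) (s : ℕ) (hx : x < 2^s) (hy : y < 2^s)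
    (hab : a ||| b = a + b) :
    (a * 2^s + x) ||| (b * 2^s + y) = (a + b) * 2^s + (x ||| y) := by
  rw [← Nat.shiftLeft_eq a, ← Nat.shiftLeft_eq b,
    Nat.shiftLeft_add_eq_or_of_lt hx, Nat.shiftLeft_add_eq_or_of_lt hy]
  have hre : (a <<< s ||| x) ||| (b <<< s ||| y) = (a <<< s ||| b <<< s) ||| (x ||| y) := by
    rw [Nat.lor_assoc, Nat.lor_comm x, Nat.lor_assoc, Nat.lor_comm y x, ← Nat.lor_assoc]
  rw [hre, ← Nat.shiftLeft_or_distrib, hab,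
    ← Nat.shiftLeft_add_eq_or_of_lt (Nat.or_lt_two_pow hx hy), Nat.shiftLeft_eq]

-- Nat: OR of an even-position digit sum with a shifted odd-position digit sum is their sum
theorem pv_interleave (n : ℕ) (f g : ℕ → ℕ) (hf : ∀ k, f k ≤ 1) (hg : ∀ k, g k ≤ 1) :
    (∑ k ∈ Finset.range n, f k * 4^k) ||| (∑ k ∈ Finset.range n, 2 * g k * 4^k)
      = ∑ k ∈ Finset.range n, (f k + 2 * g k) * 4^k := by
  induction n with
  | zero => simp
  | succ n ih =>
    rw [Finset.sum_range_succ, Finset.sum_range_succ, Finset.sum_range_succ,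
      add_comm (∑ k ∈ Finset.range n, f k * 4^k), add_comm (∑ k ∈ Finset.range n, 2 * g k * 4^k),
      add_comm (∑ k ∈ Finset.range n, (f k + 2 * g k) * 4^k)]
    have hx : (∑ k ∈ Finset.range n, f k * 4^k) < 4^n :=
      pv_sum_lt n _ (fun k => by have := hf k; omega)
    have hy : (∑ k ∈ Finset.range n, 2 * g k * 4^k) < 4^n :=
      pv_sum_lt n _ (fun k => by have := hg k; omega)
    have h4 : (4:ℕ)^n = 2^(2*n) := by rw [pow_mul]; norm_num
    rw [h4] at hx hy ⊢
    have hab : f n ||| 2 * g n = f n + 2 * g n := by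
      have h1 := hf n; have h2 := hg n
      interval_cases (f n) <;> interval_cases (g n) <;> decide
    have := pv_or_split (f n) (2 * g n) _ _ (2*n) hx hy hab
    rw [show (2:ℕ)^(2*n) = 4^n from by rw [pow_mul]; norm_num] at this ⊢
    rw [this, ih]

-- the interleaved bit value both programs compute, as a Nat
def pvMorton (n : ℕ) : ℕ := ∑ k ∈ Finset.range 8, n / 2^k % 2 * 4^k

-- B's spread, checked exhaustively on the 256 byte values
set_option maxRecDepth 10000 in
set_option maxHeartbeats 1000000 in
theorem pv_spread_byte : ∀ r : Fin 256, pvSpread (r.val : Int) = ((pvMorton r.val : ℕ) : Int) := by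
  decide

-- B's spread factors through p % 256
theorem pv_spread_eq (p : Int) : pvSpread p = ((pvMorton (p % 256).toNat : ℕ) : Int) := by
  have h0 : (0:Int) ≤ p % 256 := Int.emod_nonneg p (by norm_num)
  have h1 : p % 256 < 256 := Int.emod_lt_of_pos p (by norm_num)
  have hr : ((p % 256).toNat : Int) = p % 256 := Int.toNat_of_nonneg h0
  have hb : PySem.Int.band p 255 = PySem.Int.band ((p % 256).toNat : Int) 255 := by
    rw [pv_band255, pv_band255, hr]
    omega
  have := pv_spread_byte ⟨(p % 256).toNat, by omega⟩
  simp only [pvSpread] at this ⊢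
  rw [hb]
  exact this

-- A unfolded to its digit-sum closed form
theorem pv_A_closed (a b : Int) :
    byte_to_2bpp a b
      = ∑ k ∈ Finset.range 8, (a / 2^k % 2 + 2 * (b / 2^k % 2)) * 4^k := by
  have hrange : PySem.List.pyRange 0 8 1 = [0,1,2,3,4,5,6,7] := by decide
  simp only [byte_to_2bpp, hrange, List.foldl]
  norm_num
  rw [pv_bit_arith b 7 (by norm_num), pv_bit_arith a 7 (by norm_num),
      pv_bit_arith b 6 (by norm_num), pv_bit_arith a 6 (by norm_num),
      pv_bit_arith b 5 (by norm_num), pv_bit_arith a 5 (by norm_num),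
      pv_bit_arith b 4 (by norm_num), pv_bit_arith a 4 (by norm_num),
      pv_bit_arith b 3 (by norm_num), pv_bit_arith a 3 (by norm_num),
      pv_bit_arith b 2 (by norm_num), pv_bit_arith a 2 (by norm_num),
      pv_bit_arith b 1 (by norm_num), pv_bit_arith a 1 (by norm_num),
      pv_bit_arith b 0 (by norm_num), pv_bit_arith a 0 (by norm_num)]
  simp only [show Int.toNat 7 = 7 from rfl, show Int.toNat 6 = 6 from rfl,
    show Int.toNat 5 = 5 from rfl, show Int.toNat 4 = 4 from rfl,
    show Int.toNat 3 = 3 from rfl, show Int.toNat 2 = 2 from rfl,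
    Finset.sum_range_succ, Finset.sum_range_zero]
  norm_num
  obtain ⟨a0, ha0, ha0'⟩ : ∃ u:ℕ, (a % 2 : ℤ) = ↑u ∧ u ≤ 1 := ⟨(a % 2).toNat, by omega, by omega⟩
  obtain ⟨a1, ha1, ha1'⟩ : ∃ u:ℕ, (a / 2 % 2 : ℤ) = ↑u ∧ u ≤ 1 := ⟨(a / 2 % 2).toNat, by omega, by omega⟩
  obtain ⟨a2, ha2, ha2'⟩ : ∃ u:ℕ, (a / 4 % 2 : ℤ) = ↑u ∧ u ≤ 1 := ⟨(a / 4 % 2).toNat, by omega, by omega⟩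
  obtain ⟨a3, ha3, ha3'⟩ : ∃ u:ℕ, (a / 8 % 2 : ℤ) = ↑u ∧ u ≤ 1 := ⟨(a / 8 % 2).toNat, by omega, by omega⟩
  obtain ⟨a4, ha4, ha4'⟩ : ∃ u:ℕ, (a / 16 % 2 : ℤ) = ↑u ∧ u ≤ 1 := ⟨(a / 16 % 2).toNat, by omega, by omega⟩
  obtain ⟨a5, ha5, ha5'⟩ : ∃ u:ℕ, (a / 32 % 2 : ℤ) = ↑u ∧ u ≤ 1 := ⟨(a / 32 % 2).toNat, by omega, by omega⟩
  obtain ⟨a6, ha6, ha6'⟩ : ∃ u:ℕ, (a / 64 % 2 : ℤ) = ↑u ∧ u ≤ 1 := ⟨(a / 64 % 2).toNat, by omega, by omega⟩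
  obtain ⟨a7, ha7, ha7'⟩ : ∃ u:ℕ, (a / 128 % 2 : ℤ) = ↑u ∧ u ≤ 1 := ⟨(a / 128 % 2).toNat, by omega, by omega⟩
  obtain ⟨b0, hb0, hb0'⟩ : ∃ u:ℕ, (b % 2 : ℤ) = ↑u ∧ u ≤ 1 := ⟨(b % 2).toNat, by omega, by omega⟩
  obtain ⟨b1, hb1, hb1'⟩ : ∃ u:ℕ, (b / 2 % 2 : ℤ) = ↑u ∧ u ≤ 1 := ⟨(b / 2 % 2).toNat, by omega, by omega⟩
  obtain ⟨b2, hb2, hb2'⟩ : ∃ u:ℕ, (b / 4 % 2 : ℤ) = ↑u ∧ u ≤ 1 := ⟨(b / 4 % 2).toNat, by omega, by omega⟩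
  obtain ⟨b3, hb3, hb3'⟩ : ∃ u:ℕ, (b / 8 % 2 : ℤ) = ↑u ∧ u ≤ 1 := ⟨(b / 8 % 2).toNat, by omega, by omega⟩
  obtain ⟨b4, hb4, hb4'⟩ : ∃ u:ℕ, (b / 16 % 2 : ℤ) = ↑u ∧ u ≤ 1 := ⟨(b / 16 % 2).toNat, by omega, by omega⟩
  obtain ⟨b5, hb5, hb5'⟩ : ∃ u:ℕ, (b / 32 % 2 : ℤ) = ↑u ∧ u ≤ 1 := ⟨(b / 32 % 2).toNat, by omega, by omega⟩
  obtain ⟨b6, hb6, hb6'⟩ : ∃ u:ℕ, (b / 64 % 2 : ℤ) = ↑u ∧ u ≤ 1 := ⟨(b / 64 % 2).toNat, by omega, by omega⟩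
  obtain ⟨b7, hb7, hb7'⟩ : ∃ u:ℕ, (b / 128 % 2 : ℤ) = ↑u ∧ u ≤ 1 := ⟨(b / 128 % 2).toNat, by omega, by omega⟩
  rw [ha0, ha1, ha2, ha3, ha4, ha5, ha6, ha7, hb0, hb1, hb2, hb3, hb4, hb5, hb6, hb7]
  rw [show (0:ℤ) = ((0:ℕ):ℤ) from rfl]
  norm_cast
  have h0n : ∀ m:ℕ, ((m:ℤ) <<< (0:ℤ)) = ((m <<< 0 : ℕ) : ℤ) := fun m => by
    rw [show (0:ℤ) = ((0:ℕ):ℤ) from rfl, Int.shiftLeft_natCast]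
  have h2n : ∀ m:ℕ, ((m:ℤ) <<< (2:ℤ)) = ((m <<< 2 : ℕ) : ℤ) := fun m => by
    rw [show (2:ℤ) = ((2:ℕ):ℤ) from rfl, Int.shiftLeft_natCast]
  have h4n : ∀ m:ℕ, ((m:ℤ) <<< (4:ℤ)) = ((m <<< 4 : ℕ) : ℤ) := fun m => by
    rw [show (4:ℤ) = ((4:ℕ):ℤ) from rfl, Int.shiftLeft_natCast]
  have h6n : ∀ m:ℕ, ((m:ℤ) <<< (6:ℤ)) = ((m <<< 6 : ℕ) : ℤ) := fun m => by
    rw [show (6:ℤ) = ((6:ℕ):ℤ) from rfl, Int.shiftLeft_natCast]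
  have h8n : ∀ m:ℕ, ((m:ℤ) <<< (8:ℤ)) = ((m <<< 8 : ℕ) : ℤ) := fun m => by
    rw [show (8:ℤ) = ((8:ℕ):ℤ) from rfl, Int.shiftLeft_natCast]
  have h10n : ∀ m:ℕ, ((m:ℤ) <<< (10:ℤ)) = ((m <<< 10 : ℕ) : ℤ) := fun m => by
    rw [show (10:ℤ) = ((10:ℕ):ℤ) from rfl, Int.shiftLeft_natCast]
  have h12n : ∀ m:ℕ, ((m:ℤ) <<< (12:ℤ)) = ((m <<< 12 : ℕ) : ℤ) := fun m => by
    rw [show (12:ℤ) = ((12:ℕ):ℤ) from rfl, Int.shiftLeft_natCast]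
  have h14n : ∀ m:ℕ, ((m:ℤ) <<< (14:ℤ)) = ((m <<< 14 : ℕ) : ℤ) := fun m => by
    rw [show (14:ℤ) = ((14:ℕ):ℤ) from rfl, Int.shiftLeft_natCast]
  simp only [h0n, h2n, h4n, h6n, h8n, h10n, h12n, h14n]
  rw [show (0:ℤ) = ((0:ℕ):ℤ) from rfl]
  simp only [PySem.Int.bor_natCast]
  norm_cast
  simp only [Nat.shiftLeft_eq]
  norm_num
  rw [pv_nat_key (b0*2+a0) (b1*2+a1) (b2*2+a2) (b3*2+a3) (b4*2+a4) (b5*2+a5) (b6*2+a6) (b7*2+a7)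
    (by omega) (by omega) (by omega) (by omega) (by omega) (by omega) (by omega)]
  omega

-- digits of p's low byte, as digits of p
theorem pv_digit (p : Int) (k : Nat) (hk : k < 8) :
    (((p % 256).toNat / 2^k % 2 : ℕ) : ℤ) = p / 2^k % 2 := by
  have h0 : (0:Int) ≤ p % 256 := Int.emod_nonneg p (by norm_num)
  have h1 : p % 256 < 256 := Int.emod_lt_of_pos p (by norm_num)
  push_cast
  rw [Int.toNat_of_nonneg h0]
  interval_cases k <;> omega

theorem pv_main (p0 p1 : Int) : byte_to_2bpp p0 p1 = byte_to_2bpp_alt p0 p1 := by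
  rw [pv_A_closed]
  show _ = PySem.Int.bor (pvSpread p0) (pvSpread p1 <<< 1)
  rw [pv_spread_eq p0, pv_spread_eq p1]
  have hsh : ∀ m:ℕ, ((m:ℤ) <<< (1:ℤ)) = ((m <<< 1 : ℕ) : ℤ) := fun m => by
    rw [show (1:ℤ) = ((1:ℕ):ℤ) from rfl, Int.shiftLeft_natCast]
  rw [hsh, PySem.Int.bor_natCast, Nat.shiftLeft_eq]
  have hmul : pvMorton (p1 % 256).toNat * 2^1
      = ∑ k ∈ Finset.range 8, 2 * ((p1 % 256).toNat / 2^k % 2) * 4^k := by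
    rw [pvMorton, Finset.sum_mul]
    exact Finset.sum_congr rfl (fun k _ => by ring)
  rw [hmul, pvMorton,
    pv_interleave 8 (fun k => (p0 % 256).toNat / 2^k % 2) (fun k => (p1 % 256).toNat / 2^k % 2)
      (fun k => Nat.lt_succ_iff.mp (Nat.mod_lt _ (by norm_num)))
      (fun k => Nat.lt_succ_iff.mp (Nat.mod_lt _ (by norm_num)))]
  rw [Nat.cast_sum]
  refine Finset.sum_congr rfl (fun k hk => ?_)
  have hk8 : k < 8 := Finset.mem_range.mp hk
  rw [← pv_digit p0 k hk8, ← pv_digit p1 k hk8]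
  push_cast
  ring

-- ===== VERDICT =====
theorem byte_to_2bpp_spec : Claim_equal_byte_to_2bpp := by
  intro p0 p1 _
  unfold Spec_byte_to_2bpp
  exact pv_main p0 p1
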